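-- pv_equiv track=rewrite | github.com/Jmeigs1/advent-of-code | 2015/11/python/part1.py | has_pairs
-- ===== SOURCE A (Python) =====
-- def has_pairs(s: str):
--     skip = False
--     found = False
--     pairs = zip(s[:-1], s[1:])
--
--     for p in pairs:
--         if skip:
--             skip = False
--             continue
--         a, b = tuple(p)
--         if a == b:
--             if found:
--                 return True
--             found = True
--             skip = True
-- ===== SOURCE B (Python) =====
-- def has_pairs(s: str):
--     def rest_after_double(cs):
--         # drop chars until the first adjacent equal pair; return what follows it, or None
--         while len(cs) >= 2:
--             if cs[0] == cs[1]:
--                 return cs[2:]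
--             cs = cs[1:]
--         return None
--
--     r = rest_after_double(list(s))
--     if r is not None and rest_after_double(r) is not None:
--         return True
--     return None
-- ===== Notes on version B (the rewrite author's own statement) =====
-- stated objective: simpler
-- what changed: Replaces A's stateful pair-scan with skip/found flags by a two-phase decomposition: find the first adjacent equal pair, cut the string after it, and look for a second pair in the remainder.
import Mathlib
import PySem

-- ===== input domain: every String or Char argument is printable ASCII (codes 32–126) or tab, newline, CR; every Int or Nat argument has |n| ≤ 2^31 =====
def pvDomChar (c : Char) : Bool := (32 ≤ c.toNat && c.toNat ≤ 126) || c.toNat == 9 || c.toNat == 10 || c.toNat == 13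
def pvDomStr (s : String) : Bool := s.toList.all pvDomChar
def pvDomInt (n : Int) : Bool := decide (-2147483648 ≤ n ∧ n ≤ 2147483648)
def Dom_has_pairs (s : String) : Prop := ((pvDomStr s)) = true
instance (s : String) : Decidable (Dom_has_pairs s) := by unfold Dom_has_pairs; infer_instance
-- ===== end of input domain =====

-- B replaces A's stateful skip/found pair-scan with a two-phase "find first double, then a second one
-- in the remainder" decomposition (objective: simpler). Both are total; return value only (no mutation).

-- ===== PORT A =====
-- the for-loop over zip(s[:-1], s[1:]) with its (skip, found) state; early 'return True' = some true,
-- falling off the loop (Python's implicit 'return None') = none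
def hasPairsLoopA : List (Char × Char) → Bool → Bool → Option Bool
  | [], _, _ => none
  | (a, b) :: rest, skip, found =>
    if skip then hasPairsLoopA rest false found
    else if a = b then
      if found then some true
      else hasPairsLoopA rest true true
    else hasPairsLoopA rest skip found

def has_pairs (s : String) : Option Bool :=
  hasPairsLoopA
    (List.zip (PySem.List.slice s.toList none (some (-1))) (PySem.List.slice s.toList (some 1) none))
    false false

-- ===== PORT B =====
-- Source B's rest_after_double: drop chars until the first adjacent equal pair, return what follows it
def restAfterDouble : List Char → Option (List Char)
  | a :: b :: rest => if a = b then some rest else restAfterDouble (b :: rest)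
  | _ => none

def has_pairs_alt (s : String) : Option Bool :=
  match restAfterDouble s.toList with
  | some r =>
    match restAfterDouble r with
    | some _ => some true
    | none => none
  | none => none

-- ===== PRECONDITION & SPEC =====
def Spec_has_pairs (s : String) (out : Option Bool) : Prop := out = has_pairs_alt s
instance (s : String) (out : Option Bool) : Decidable (Spec_has_pairs s out) := by unfold Spec_has_pairs; infer_instance

-- ===== CLAIM (what is proved, stated in full; the proofs are below) =====
def Claim_equal_has_pairs : Prop := ∀ (s : String), Dom_has_pairs s → Spec_has_pairs s (has_pairs s)

-- ===== LEMMAS AND PROOFS =====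

-- the pair list A iterates over, as a function of the char list
def pairsOf (cs : List Char) : List (Char × Char) := List.zip cs.dropLast cs.tail

lemma pairsOf_cons₂ (a b : Char) (t : List Char) :
    pairsOf (a :: b :: t) = (a, b) :: pairsOf (b :: t) := by
  cases t <;> simp [pairsOf, List.dropLast]

-- phase 2: with found = true, A returns some true iff the remaining chars contain an adjacent double
lemma loopA_found (cs : List Char) :
    hasPairsLoopA (pairsOf cs) false true =
      (match restAfterDouble cs with | some _ => some true | none => none) := by
  induction cs with
  | nil => simp [pairsOf, hasPairsLoopA, restAfterDouble]
  | cons a rest ih =>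
    cases rest with
    | nil => simp [pairsOf, hasPairsLoopA, restAfterDouble]
    | cons b t =>
      rw [pairsOf_cons₂]
      by_cases h : a = b
      · simp [hasPairsLoopA, restAfterDouble, h]
      · simp only [hasPairsLoopA, if_neg h]
        rw [ih]
        simp [restAfterDouble, h]

-- phase 1: from the start state, A finds the first double, skips past it, and continues in found state
lemma loopA_start (cs : List Char) :
    hasPairsLoopA (pairsOf cs) false false =
      (match restAfterDouble cs with
       | some r => hasPairsLoopA (pairsOf r) false true
       | none => none) := by
  induction cs with
  | nil => simp [pairsOf, hasPairsLoopA, restAfterDouble]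
  | cons a rest ih =>
    cases rest with
    | nil => simp [pairsOf, hasPairsLoopA, restAfterDouble]
    | cons b t =>
      rw [pairsOf_cons₂]
      by_cases h : a = b
      · 
        have hskip : hasPairsLoopA (pairsOf (b :: t)) true true =
            hasPairsLoopA (pairsOf t) false true := by
          cases t with
          | nil => simp [pairsOf, hasPairsLoopA]
          | cons c u => rw [pairsOf_cons₂]; simp [hasPairsLoopA]
        simp only [hasPairsLoopA, if_pos h, Bool.false_eq_true, if_false]
        simp [h, hskip, restAfterDouble]
      · simp only [hasPairsLoopA, if_neg h]
        rw [ih]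
        simp [restAfterDouble, h]

-- ===== VERDICT (by name: the statement is the Claim_ definition above) =====
theorem has_pairs_spec : Claim_equal_has_pairs := by
  intro s _
  show has_pairs s = has_pairs_alt s
  have hp : has_pairs s = hasPairsLoopA (pairsOf s.toList) false false := by
    simp [has_pairs, pairsOf, PySem.List.slice_to_neg_one, PySem.List.slice_from_one]
  rw [hp, loopA_start, has_pairs_alt]
  cases hr : restAfterDouble s.toList with
  | none => simp
  | some r => simp [loopA_found r]
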